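-- pv_equiv track=rewrite | github.com/tvquizphd/abeci | modules/writePatterns.py | invalidate
-- ===== SOURCE A (Python) =====
-- def invalidate(letterMap, maxReps, vcl):
--     repMap = {}
--     for k in vcl:
--         if k not in letterMap:
--             return True
--         if k in maxReps:
--             repMap[k] = repMap.get(k, 0) + 1
--             if repMap[k] > maxReps[k]:
--                 return True
--     return False
-- ===== SOURCE B (Python) =====
-- def invalidate(letterMap, maxReps, vcl):
--     counts = {}
--     for k in vcl:
--         counts[k] = counts.get(k, 0) + 1
--     if any(k not in letterMap for k in counts):
--         return True
--     for k in maxReps: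
--         if k in counts and counts[k] > maxReps[k]:
--             return True
--     return False
-- ===== Notes on version B (the rewrite author's own statement) =====
-- stated objective: alternative
-- what changed: Replaces A's single incremental pass over vcl (early returns, running per-letter tallies checked against the limit at each step) with a count-everything-first frequency table followed by two separate checks: an existence check over the table's keys for unknown letters, and a verification loop keyed on maxReps rather than on vcl.
import Mathlib
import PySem

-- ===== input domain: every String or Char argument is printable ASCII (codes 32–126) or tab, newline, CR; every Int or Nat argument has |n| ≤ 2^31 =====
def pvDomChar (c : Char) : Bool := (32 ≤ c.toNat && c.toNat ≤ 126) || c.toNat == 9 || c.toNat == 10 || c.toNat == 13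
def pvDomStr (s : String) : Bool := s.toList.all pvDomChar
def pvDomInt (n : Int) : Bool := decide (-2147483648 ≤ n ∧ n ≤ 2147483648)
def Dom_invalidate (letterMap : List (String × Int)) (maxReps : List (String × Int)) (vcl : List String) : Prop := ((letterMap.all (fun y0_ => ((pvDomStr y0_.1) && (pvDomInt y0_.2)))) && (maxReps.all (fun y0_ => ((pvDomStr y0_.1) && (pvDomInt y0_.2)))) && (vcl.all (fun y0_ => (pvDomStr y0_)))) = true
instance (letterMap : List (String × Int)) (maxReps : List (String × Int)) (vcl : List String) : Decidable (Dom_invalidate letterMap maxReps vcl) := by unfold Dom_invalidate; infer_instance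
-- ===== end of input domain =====

-- B replaces A's single incremental pass with a frequency table built first, then two
-- separate checks (unknown-letter check over the table, limit check keyed on maxReps);
-- a genuinely different decomposition of the same validation, same cost.


-- ===== PORT A =====
-- the 'for k in vcl' loop with its early returns and the running repMap tally
def invalidateGo (lmd mrd : PySem.Dict String Int) (vcl : List String)
    (repMap : PySem.Dict String Int) : Bool :=
  match vcl with
  | [] => false
  | k :: rest =>
    if !(lmd.contains k) then true            -- if k not in letterMap: return True
    else if mrd.contains k then               -- if k in maxReps:
      let c := repMap.getD k 0 + 1            --   repMap[k] = repMap.get(k, 0) + 1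
      let repMap' := repMap.insert k c
      if c > mrd.getD k 0 then true           --   if repMap[k] > maxReps[k]: return True
      else invalidateGo lmd mrd rest repMap'
    else invalidateGo lmd mrd rest repMap

def invalidate (letterMap : List (String × Int)) (maxReps : List (String × Int)) (vcl : List String) : Bool :=
  invalidateGo (PySem.Dict.mk letterMap) (PySem.Dict.mk maxReps) vcl PySem.Dict.empty

-- ===== PORT B =====
def invalidate_alt (letterMap : List (String × Int)) (maxReps : List (String × Int)) (vcl : List String) : Bool :=
  -- counts = {}; for k in vcl: counts[k] = counts.get(k, 0) + 1
  let counts : PySem.Dict String Int :=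
    vcl.foldl (fun d k => d.insert k (d.getD k 0 + 1)) PySem.Dict.empty
  let lmd := PySem.Dict.mk letterMap
  let mrd := PySem.Dict.mk maxReps
  -- if any(k not in letterMap for k in counts): return True
  if counts.keys.any (fun k => !(lmd.contains k)) then true
  -- for k in maxReps: if k in counts and counts[k] > maxReps[k]: return True
  else mrd.keys.any (fun k => counts.contains k && counts.getD k 0 > mrd.getD k 0)

-- ===== PRECONDITION & SPEC =====
def Spec_invalidate (letterMap : List (String × Int)) (maxReps : List (String × Int)) (vcl : List String) (out : Bool) : Prop := out = invalidate_alt letterMap maxReps vcl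
instance (letterMap : List (String × Int)) (maxReps : List (String × Int)) (vcl : List String) (out : Bool) : Decidable (Spec_invalidate letterMap maxReps vcl out) := by unfold Spec_invalidate; infer_instance

-- ===== CLAIM (what is proved, stated in full; the proofs are below) =====
def Claim_equal_invalidate : Prop := ∀ (letterMap : List (String × Int)) (maxReps : List (String × Int)) (vcl : List String), Dom_invalidate letterMap maxReps vcl → Spec_invalidate letterMap maxReps vcl (invalidate letterMap maxReps vcl)

-- ===== LEMMAS AND PROOFS =====

-- A's loop returns True iff some letter is unknown, or some letter of vcl is limited by
-- maxReps and its carried-in tally plus its total count in vcl exceeds the limit.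
theorem invalidateGo_eq_true_iff (lmd mrd : PySem.Dict String Int) (vcl : List String)
    (rep : PySem.Dict String Int) :
    invalidateGo lmd mrd vcl rep = true ↔
      (∃ k ∈ vcl, lmd.contains k = false) ∨
      (∃ k ∈ vcl, mrd.contains k = true ∧
        rep.getD k 0 + (vcl.count k : Int) > mrd.getD k 0) := by
  induction vcl generalizing rep with
  | nil => simp [invalidateGo]
  | cons k rest ih =>
    rw [invalidateGo]
    by_cases hlm : lmd.contains k = true
    · simp only [hlm, Bool.not_true, Bool.false_eq_true, if_false]
      by_cases hmr : mrd.contains k = true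
      · simp only [hmr, if_true]
        by_cases htrig : rep.getD k 0 + 1 > mrd.getD k 0
        · simp only [if_pos htrig, true_iff]
          refine Or.inr ⟨k, List.mem_cons_self .., hmr, ?_⟩
          have : (1 : Int) ≤ ((k :: rest).count k : Int) := by
            have := List.count_pos_iff.mpr (List.mem_cons_self (a := k) (l := rest))
            exact_mod_cast this
          omega
        · rw [if_neg htrig, ih]
          constructor
          · rintro (⟨j, hj, hjf⟩ | ⟨j, hj, hjc, hjlt⟩)
            · exact Or.inl ⟨j, List.mem_cons_of_mem _ hj, hjf⟩
            · refine Or.inr ⟨j, List.mem_cons_of_mem _ hj, hjc, ?_⟩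
              by_cases hjk : j = k
              · subst hjk
                rw [PySem.Dict.getD_insert_self] at hjlt
                rw [List.count_cons_self]
                push_cast
                omega
              · rw [PySem.Dict.getD_insert_of_ne _ _ _ hjk] at hjlt
                have hcc : List.count j (k :: rest) = List.count j rest := by
                  simp [Ne.symm hjk]
                rw [hcc]
                exact hjlt
          · rintro (⟨j, hj, hjf⟩ | ⟨j, hj, hjc, hjlt⟩)
            · rcases List.mem_cons.mp hj with rfl | hj'
              · rw [hjf] at hlm; cases hlm
              · exact Or.inl ⟨j, hj', hjf⟩
            · by_cases hjk : j = k
              · subst hjk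
                rw [List.count_cons_self] at hjlt
                have hjrest : j ∈ rest := by
                  by_contra hn
                  have : rest.count j = 0 := List.count_eq_zero.mpr hn
                  rw [this] at hjlt
                  push_cast at hjlt
                  omega
                refine Or.inr ⟨j, hjrest, hjc, ?_⟩
                rw [PySem.Dict.getD_insert_self]
                push_cast at hjlt ⊢
                omega
              · rcases List.mem_cons.mp hj with rfl | hj'
                · exact absurd rfl hjk
                · refine Or.inr ⟨j, hj', hjc, ?_⟩
                  rw [PySem.Dict.getD_insert_of_ne _ _ _ hjk]
                  have hcc : List.count j (k :: rest) = List.count j rest := by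
                    simp [Ne.symm hjk]
                  rw [hcc] at hjlt
                  exact hjlt
      · simp only [hmr, if_false, Bool.false_eq_true]
        rw [ih]
        constructor
        · rintro (⟨j, hj, hjf⟩ | ⟨j, hj, hjc, hjlt⟩)
          · exact Or.inl ⟨j, List.mem_cons_of_mem _ hj, hjf⟩
          · refine Or.inr ⟨j, List.mem_cons_of_mem _ hj, hjc, ?_⟩
            have hjk : j ≠ k := by rintro rfl; exact hmr hjc
            have hcc : List.count j (k :: rest) = List.count j rest := by
              simp [Ne.symm hjk]
            rw [hcc]
            exact hjlt
        · rintro (⟨j, hj, hjf⟩ | ⟨j, hj, hjc, hjlt⟩)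
          · rcases List.mem_cons.mp hj with rfl | hj'
            · rw [hjf] at hlm; cases hlm
            · exact Or.inl ⟨j, hj', hjf⟩
          · have hjk : j ≠ k := by rintro rfl; exact hmr hjc
            rcases List.mem_cons.mp hj with rfl | hj'
            · exact absurd rfl hjk
            · refine Or.inr ⟨j, hj', hjc, ?_⟩
              have hcc : List.count j (k :: rest) = List.count j rest := by
                simp [Ne.symm hjk]
              rw [hcc] at hjlt
              exact hjlt
    · simp only [Bool.not_eq_true] at hlm
      simp only [hlm, Bool.not_false, if_true, true_iff]
      exact Or.inl ⟨k, List.mem_cons_self .., hlm⟩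

-- B returns True under exactly the same condition (with an empty carried-in tally).
theorem invalidate_alt_eq_true_iff (letterMap maxReps : List (String × Int)) (vcl : List String) :
    invalidate_alt letterMap maxReps vcl = true ↔
      (∃ k ∈ vcl, (PySem.Dict.mk letterMap).contains k = false) ∨
      (∃ k ∈ vcl, (PySem.Dict.mk maxReps).contains k = true ∧
        (0 : Int) + (vcl.count k : Int) > (PySem.Dict.mk maxReps).getD k 0) := by
  simp only [invalidate_alt, PySem.Dict.foldl_insert_getD_add_one_eq_counter]
  rw [Bool.if_true_left]
  simp only [Bool.or_eq_true, List.any_eq_true, PySem.Dict.keys_counter, PySem.Set.mem_ofList,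
    PySem.Dict.contains_counter, PySem.Dict.getD_counter, Bool.not_eq_true',
    PySem.Dict.contains_iff_mem_keys, Bool.and_eq_true, decide_eq_true_eq, gt_iff_lt, zero_add,
    List.contains_iff_mem]
  constructor
  · rintro (h | ⟨k, hk, hv, hlt⟩)
    · exact Or.inl h
    · exact Or.inr ⟨k, hv, hk, hlt⟩
  · rintro (h | ⟨k, hv, hk, hlt⟩)
    · exact Or.inl h
    · exact Or.inr ⟨k, hk, hv, hlt⟩

-- ===== VERDICT (by name: the statement is the Claim_ definition above) =====
theorem invalidate_spec : Claim_equal_invalidate := by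
  intro letterMap maxReps vcl _
  unfold Spec_invalidate invalidate
  rw [Bool.eq_iff_iff, invalidateGo_eq_true_iff, invalidate_alt_eq_true_iff]
  simp [PySem.Dict.getD_empty]
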